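-- pv_equiv track=rewrite | github.com/cesarsaez/proxmox-vm-deployer-ui | backend/app/utils/cloudinit.py | parse_ipconfig
-- ===== SOURCE A (Python) =====
-- from typing import Dict, Any, Optional
--
-- def parse_ipconfig(ipconfig_str: str) -> Dict[str, str]:
--     """
--     Parse ipconfig string into Proxmox format
--
--     Args:
--         ipconfig_str: IP configuration string (e.g., 'ip=192.168.1.100/24,gw=192.168.1.1')
--
--     Returns:
--         Dictionary with parsed IP configuration
--     """
--     config = {}
--
--     if not ipconfig_str:
--         return {'ip': 'dhcp'}
--
--     # If it's already in Proxmox format, return as is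
--     if '=' in ipconfig_str and ',' in ipconfig_str:
--         return {'ipconfig0': ipconfig_str}
--
--     # Otherwise parse individual components
--     parts = ipconfig_str.split(',')
--     for part in parts:
--         if '=' in part:
--             key, value = part.split('=', 1)
--             config[key.strip()] = value.strip()
--
--     return {'ipconfig0': ipconfig_str} if config else {'ip': 'dhcp'}
-- ===== SOURCE B (Python) =====
-- def parse_ipconfig(ipconfig_str: str):
--     """Return {'ip': 'dhcp'} for an empty string or one with no '=', else wrap the string as ipconfig0."""
--     if not ipconfig_str:
--         return {'ip': 'dhcp'}
--     return {'ipconfig0': ipconfig_str} if '=' in ipconfig_str else {'ip': 'dhcp'}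
-- ===== Notes on version B (the rewrite author's own statement) =====
-- stated objective: simpler
-- what changed: B drops A's comma-split loop and the never-returned config dict entirely: since any comma-separated part containing '=' exists iff '=' occurs in the whole string, B reduces the decision to one membership test ('=' in ipconfig_str).
import Mathlib
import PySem

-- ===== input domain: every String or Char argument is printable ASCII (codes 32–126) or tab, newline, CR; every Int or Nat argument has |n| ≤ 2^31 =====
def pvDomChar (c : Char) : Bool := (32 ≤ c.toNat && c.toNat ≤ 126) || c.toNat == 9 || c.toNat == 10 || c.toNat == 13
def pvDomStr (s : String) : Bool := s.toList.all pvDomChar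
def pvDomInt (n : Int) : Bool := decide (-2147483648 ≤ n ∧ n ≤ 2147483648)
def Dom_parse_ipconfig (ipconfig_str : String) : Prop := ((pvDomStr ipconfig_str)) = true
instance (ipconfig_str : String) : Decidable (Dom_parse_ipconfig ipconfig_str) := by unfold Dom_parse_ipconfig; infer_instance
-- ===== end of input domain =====

-- B collapses A's comma-split loop and its never-returned config dict into a single "'=' in s" membership test (objective: simpler).


-- ===== PORT A =====
-- the body of A's for-loop over parts (builds the config dict; 'key, value = part.split("=", 1)')
def pvStep (cfg : PySem.Dict String String) (part : String) : PySem.Dict String String :=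
  if PySem.Str.isIn "=" part then
    match (PySem.Chars.splitOnMax part.toList "=".toList 1).map String.ofList with
    | key :: value :: _ => cfg.insert (PySem.Str.strip key) (PySem.Str.strip value)
    | _ => cfg  -- unreachable: split('=', 1) with '=' present yields exactly two pieces
  else cfg

def parse_ipconfig (ipconfig_str : String) : List (String × String) :=
  let config : PySem.Dict String String := { items := [] }
  if ipconfig_str.toList = [] then [("ip", "dhcp")]
  else if PySem.Str.isIn "=" ipconfig_str && PySem.Str.isIn "," ipconfig_str then
    [("ipconfig0", ipconfig_str)]
  else
    let parts : List String := (PySem.Chars.splitOn ipconfig_str.toList ",".toList).map String.ofList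
    let config := parts.foldl pvStep config
    if config.items ≠ [] then [("ipconfig0", ipconfig_str)] else [("ip", "dhcp")]

-- ===== PORT B =====
def parse_ipconfig_alt (ipconfig_str : String) : List (String × String) :=
  if ipconfig_str.toList = [] then [("ip", "dhcp")]
  else if PySem.Str.isIn "=" ipconfig_str then [("ipconfig0", ipconfig_str)]
  else [("ip", "dhcp")]

-- ===== PRECONDITION & SPEC =====
def Spec_parse_ipconfig (ipconfig_str : String) (out : List (String × String)) : Prop := out = parse_ipconfig_alt ipconfig_str
instance (ipconfig_str : String) (out : List (String × String)) : Decidable (Spec_parse_ipconfig ipconfig_str out) := by unfold Spec_parse_ipconfig; infer_instance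

-- ===== CLAIM (what is proved, stated in full; the proofs are below) =====
def Claim_equal_parse_ipconfig : Prop := ∀ (ipconfig_str : String), Dom_parse_ipconfig ipconfig_str → Spec_parse_ipconfig ipconfig_str (parse_ipconfig ipconfig_str)

-- ===== LEMMAS AND PROOFS =====

-- '[c] in t' is just membership of the character
theorem pv_isIn_single (c : Char) (t : String) :
    PySem.Str.isIn (String.ofList [c]) t = true ↔ c ∈ t.toList := by
  rw [PySem.Str.isIn_iff_infix]
  have hl : (String.ofList [c]).toList = [c] := by simp
  rw [hl]
  constructor
  · rintro ⟨u, v, h⟩; exact h ▸ by simp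
  · intro h
    obtain ⟨u, v, huv⟩ := List.append_of_mem h
    exact ⟨u, v, by rw [huv]; simp⟩

-- splitOn on a single-char separator neither loses nor invents other characters
theorem pv_splitOn_go_mem (c : Char) (hc : c ≠ ',') :
    ∀ (fuel : Nat) (l cur : List Char) (acc : List (List Char)),
      ((∃ p ∈ PySem.Chars.splitOn.go [','] fuel l cur acc, c ∈ p) ↔
        (∃ p ∈ acc, c ∈ p) ∨ c ∈ cur ∨ c ∈ l) := by
  intro fuel
  induction fuel with
  | zero =>
    intro l cur acc
    rw [PySem.Chars.splitOn.go.eq_def]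
    simp only [List.mem_reverse, List.mem_cons]
    aesop
  | succ n ih =>
    intro l cur acc
    cases l with
    | nil =>
      rw [PySem.Chars.splitOn.go.eq_def]
      simp only [List.mem_reverse, List.mem_cons]
      aesop
    | cons c' rest =>
      rw [PySem.Chars.splitOn.go.eq_def]
      simp only []
      by_cases hp : [','].isPrefixOf (c' :: rest) = true
      · have hc' : c' = ',' := by
          have h2 : ',' = c' := by simpa [List.isPrefixOf] using hp
          exact h2.symm
        rw [if_pos hp]
        have hdrop : List.drop [','].length (c' :: rest) = rest := rfl
        rw [hdrop, ih rest [] (cur.reverse :: acc)]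
        subst hc'
        simp only [List.mem_cons, List.not_mem_nil]
        aesop
      · rw [if_neg hp]
        rw [ih rest (c' :: cur) acc]
        simp only [List.mem_cons]
        aesop

-- maxsplit exhausted: the rest is one chunk
theorem pv_splitOnMax_go_zero (sep : List Char) :
    ∀ (fuel : Nat) (l cur : List Char) (acc : List (List Char)),
      PySem.Chars.splitOnMax.go sep fuel 0 l cur acc = ((cur.reverse ++ l) :: acc).reverse := by
  intro fuel l cur acc
  cases fuel with
  | zero => rw [PySem.Chars.splitOnMax.go.eq_def]
  | succ n =>
    cases l with
    | nil => rw [PySem.Chars.splitOnMax.go.eq_def]; simp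
    | cons c rest => rw [PySem.Chars.splitOnMax.go.eq_def]; simp

-- if '=' occurs, split('=', 1) produces exactly two pieces
theorem pv_splitOnMax_go_shape :
    ∀ (fuel : Nat) (l cur : List Char), l.length < fuel → '=' ∈ l →
      ∃ a b, PySem.Chars.splitOnMax.go ['='] fuel 1 l cur [] = [a, b] := by
  intro fuel
  induction fuel with
  | zero => intro l cur h; omega
  | succ n ih =>
    intro l cur hlen hmem
    cases l with
    | nil => simp at hmem
    | cons c rest =>
      rw [PySem.Chars.splitOnMax.go.eq_def]
      simp only [if_neg (by omega : ¬ (1 : Nat) = 0)]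
      by_cases hp : ['='].isPrefixOf (c :: rest) = true
      · rw [if_pos hp]
        refine ⟨cur.reverse, List.drop ['='].length (c :: rest), ?_⟩
        rw [pv_splitOnMax_go_zero]
        simp
      · rw [if_neg hp]
        have hc : ¬ c = '=' := by
          intro h; exact hp (by simp [List.isPrefixOf, h])
        have hmem' : '=' ∈ rest := by
          rcases List.mem_cons.mp hmem with h | h
          · exact absurd h.symm hc
          · exact h
        exact ih rest (c :: cur) (by simpa using Nat.lt_of_succ_lt_succ hlen) hmem'

theorem pv_insert_items_ne_nil (d : PySem.Dict String String) (k v : String) :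
    (d.insert k v).items ≠ [] := by
  unfold PySem.Dict.insert
  split_ifs with h
  · intro hnil
    simp only [List.map_eq_nil_iff] at hnil
    simp [PySem.Dict.contains, hnil] at h
  · simp

theorem pv_step_ne_nil_of_ne_nil (cfg : PySem.Dict String String) (p : String)
    (h : cfg.items ≠ []) : (pvStep cfg p).items ≠ [] := by
  unfold pvStep
  split_ifs with hin
  · split
    · exact pv_insert_items_ne_nil _ _ _
    · exact h
  · exact h

theorem pv_step_ne_nil_of_isIn (cfg : PySem.Dict String String) (p : String)
    (h : PySem.Str.isIn "=" p = true) : (pvStep cfg p).items ≠ [] := by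
  have hmem : '=' ∈ p.toList := (pv_isIn_single '=' p).mp h
  obtain ⟨a, b, hab⟩ :=
    pv_splitOnMax_go_shape (p.toList.length + 1) p.toList [] (by omega) hmem
  unfold pvStep
  rw [if_pos h]
  have hsm : PySem.Chars.splitOnMax p.toList "=".toList 1 = [a, b] := by
    unfold PySem.Chars.splitOnMax
    rw [if_neg (by omega : ¬ (1 : Int) < 0)]
    exact hab
  rw [hsm]
  simp only [List.map_cons]
  exact pv_insert_items_ne_nil _ _ _

theorem pv_foldl_ne_nil (parts : List String) :
    ∀ (cfg : PySem.Dict String String), cfg.items ≠ [] →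
      (parts.foldl pvStep cfg).items ≠ [] := by
  induction parts with
  | nil => intro cfg h; simpa using h
  | cons p rest ih =>
    intro cfg h
    exact ih (pvStep cfg p) (pv_step_ne_nil_of_ne_nil cfg p h)

theorem pv_foldl_nil_of_no_eq (parts : List String)
    (h : ∀ p ∈ parts, PySem.Str.isIn "=" p = false) :
    parts.foldl pvStep { items := [] } = ({ items := [] } : PySem.Dict String String) := by
  induction parts with
  | nil => rfl
  | cons p rest ih =>
    have hp : PySem.Str.isIn "=" p = false := h p (by simp)
    have : pvStep { items := [] } p = { items := [] } := by
      unfold pvStep; rw [hp]; simp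
    simp only [List.foldl_cons, this]
    exact ih (fun q hq => h q (by simp [hq]))

theorem pv_foldl_ne_nil_of_mem (parts : List String) (p : String)
    (hp : p ∈ parts) (hin : PySem.Str.isIn "=" p = true) :
    ∀ (cfg : PySem.Dict String String), (parts.foldl pvStep cfg).items ≠ [] := by
  induction parts with
  | nil => simp at hp
  | cons q rest ih =>
    intro cfg
    rcases List.mem_cons.mp hp with h | h
    · subst h
      exact pv_foldl_ne_nil rest _ (pv_step_ne_nil_of_isIn cfg p hin)
    · exact ih h (pvStep cfg q)

-- '=' occurs in some comma-part of s iff it occurs in s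
theorem pv_eq_in_parts_iff (s : String) :
    ((∃ cs ∈ PySem.Chars.splitOn s.toList ",".toList, '=' ∈ cs) ↔ '=' ∈ s.toList) := by
  have h := pv_splitOn_go_mem '=' (by decide) (s.toList.length + 1) s.toList [] []
  unfold PySem.Chars.splitOn
  have hsep : (",".toList : List Char) = [','] := rfl
  rw [hsep]
  rw [h]
  simp

-- ===== VERDICT (by name: the statement is the Claim_ definition above) =====
theorem parse_ipconfig_spec : Claim_equal_parse_ipconfig := by
  unfold Claim_equal_parse_ipconfig
  intro s _
  show parse_ipconfig s = parse_ipconfig_alt s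
  unfold parse_ipconfig parse_ipconfig_alt
  by_cases h0 : s.toList = []
  · simp [h0]
  rw [if_neg h0, if_neg h0]
  by_cases he : PySem.Str.isIn "=" s = true
  · rw [if_pos he]
    by_cases hc : PySem.Str.isIn "," s = true
    · rw [he, hc]; simp
    · rw [he, Bool.eq_false_iff.mpr hc]
      simp only [Bool.and_false, Bool.false_eq_true, if_false]
      have hmem : '=' ∈ s.toList := (pv_isIn_single '=' s).mp he
      obtain ⟨cs, hcs, hcmem⟩ := (pv_eq_in_parts_iff s).mpr hmem
      have hpart : (String.ofList cs) ∈ (PySem.Chars.splitOn s.toList ",".toList).map String.ofList :=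
        List.mem_map_of_mem hcs
      have hin : PySem.Str.isIn "=" (String.ofList cs) = true :=
        (pv_isIn_single '=' (String.ofList cs)).mpr (by simpa using hcmem)
      have := pv_foldl_ne_nil_of_mem _ _ hpart hin ({ items := [] })
      simp only [this, ne_eq, not_false_eq_true, if_true]
  · rw [Bool.eq_false_iff.mpr he]
    simp only [Bool.false_and, Bool.false_eq_true, if_false]
    have hno : ∀ p ∈ (PySem.Chars.splitOn s.toList ",".toList).map String.ofList,
        PySem.Str.isIn "=" p = false := by
      intro p hp
      rcases List.mem_map.mp hp with ⟨cs, hcs, rfl⟩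
      by_contra hcon
      rw [Bool.not_eq_false] at hcon
      have : '=' ∈ cs := by
        have := (pv_isIn_single '=' (String.ofList cs)).mp hcon
        simpa using this
      exact he ((pv_isIn_single '=' s).mpr ((pv_eq_in_parts_iff s).mp ⟨cs, hcs, this⟩))
    rw [pv_foldl_nil_of_no_eq _ hno]
    simp
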